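-- pv_equiv track=rewrite | github.com/Arsen1302/Code-copy-detector | TestData/solutions/problem_504_3_1.py | solution_504_3_1
-- ===== SOURCE A (Python) =====
-- from typing import List
--
-- def solution_504_3_1(s: str) -> List[str]:
--     #First, we need to decide how to split s into two numbers! This will decide where to put
--     #comma!
--
--     #Then, we need to see if we are able to put decimal point in only one of the two splitted
--     #numbers!
--
--     #we also need to exclude the parentheses characteres!
--     s = s[1:len(s)-1]
--     #we need to define some solution_504_3_2 to determine all possible valid coordinate values
--     #we can form using substring x as input!
--     def solution_504_3_2(x):
--         #if x is single character, then itself is a valid coordinate value and only one!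
--         if(len(x) == 1):
--             return [x]
--         #if x has both first and last character be a 0, it can't ever result in a
--         #valid coordinate value!
--         if(x[0] == "0" and x[len(x)-1] == "0"):
--             return []
--         #if only first character is 0, only valid coordinate value it can form is
--         #in form 0.xxxxxx...!
--         if(x[0] == "0"):
--             return ["0." + x[1:]]
--         #if last digit is a 0, it can always be simplified no matter where I place
--         #decimal point, thus only possible coordinate value candidate is x itself!
--         if(x[-1] == '0'):
--             return [x]
--         #otherwise, we can simply generate all possible coordinate values by placing
--         #decimal point between every two digits!
--         else:
--             #string x as itself is one of many ways!
--             local = [x]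
--             #we will iterate from first char to 2nd to last char!
--             cur = ""
--             for i in range(0, len(x) - 1):
--                 cur += x[i]
--                 second_portion = x[i+1:]
--                 overall = cur + "." + second_portion
--                 local.append(overall)
--             return local
--
--
--
--
--
--
--
--     ans = []
--     n = len(s)
--     #For each iteration, we consider a possible split!
--     for i in range(1, n):
--         #consider splitting the string input s into left and right portions!
--         #Left portion will determine all possible first coordinate values!
--         #Right portion will determine all possible second coordinate values!
--         l = s[:i]
--         r = s[i:]
--         #Once we find all possible first and second coordinate values, we simply
--         #need to find all pairings!
--         left_vals = solution_504_3_2(l)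
--         right_vals = solution_504_3_2(r)
--
--         #before running for loop, we need to make sure that left_vals and right_vals is both
--         #not an empty array. If even one of them is empty, it is not possible to form
--         #a single valid 2-d coordinate pairing!
--         if(not left_vals and not right_vals):
--             continue
--         for l in left_vals:
--             for r in right_vals:
--                 new_pairing = "(" + l + ", " + r + ")"
--                 ans.append(new_pairing)
--     return ans
-- ===== SOURCE B (Python) =====
-- from typing import List
--
-- def solution_504_3_1(s: str) -> List[str]:
--     # strip the parentheses
--     t = s[1:len(s) - 1]
--     n = len(t)
--
--     # integer part (or whole number) is valid iff it is "0" or has no leading zero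
--     def ok(a):
--         return a == "0" or a[0] != "0"
--
--     # Stage 1: dot-split tables, built incrementally (no per-candidate slicing).
--     # lsp[i] = all (int, frac) splits of the prefix t[:i], dot position ascending;
--     # each is obtained from lsp[i-1] by extending the fraction with t[i-1].
--     lsp = [[] for _ in range(n + 1)]
--     for i in range(2, n + 1):
--         lsp[i] = [(a, b + t[i - 1]) for (a, b) in lsp[i - 1]] + [(t[:i - 1], t[i - 1])]
--
--     # rsp[i] = all (int, frac) splits of the suffix t[i:], dot position ascending;
--     # each is obtained from rsp[i+1] by extending the integer part with t[i].
--     rsp = [[] for _ in range(n + 1)]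
--     for i in range(n - 2, -1, -1):
--         rsp[i] = [(t[i], t[i + 1:])] + [(t[i] + a, b) for (a, b) in rsp[i + 1]]
--
--     # all valid numbers for a substring x with split table `splits`
--     def cands(x, splits):
--         return ([x] if ok(x) else []) + \
--                [a + "." + b for (a, b) in splits if ok(a) and b[-1] != "0"]
--
--     # Stage 2: pair every valid left number with every valid right number
--     return ["(" + l + ", " + r + ")"
--             for i in range(1, n)
--             for l in cands(t[:i], lsp[i])
--             for r in cands(t[i:], rsp[i])]
-- ===== Notes on version B (the rewrite author's own statement) =====
-- stated objective: alternative
-- what changed: Instead of a per-split helper that branches four ways and slices out every dot position, B precomputes two dynamic-programming tables of (integer,fraction) dot-splits -- prefix splits grown rightward by extending the fraction, suffix splits grown leftward by extending the integer part -- and then a single comprehension pairs the table entries filtered by one validity predicate.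
import Mathlib
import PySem

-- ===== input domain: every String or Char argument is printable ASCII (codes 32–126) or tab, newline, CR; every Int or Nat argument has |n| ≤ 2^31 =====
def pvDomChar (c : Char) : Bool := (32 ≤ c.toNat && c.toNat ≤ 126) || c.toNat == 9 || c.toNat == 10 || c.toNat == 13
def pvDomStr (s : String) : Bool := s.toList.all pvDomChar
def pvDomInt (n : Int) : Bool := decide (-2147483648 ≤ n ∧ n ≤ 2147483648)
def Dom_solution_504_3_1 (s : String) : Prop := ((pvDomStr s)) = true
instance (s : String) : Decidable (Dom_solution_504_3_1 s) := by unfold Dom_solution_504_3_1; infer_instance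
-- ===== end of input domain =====

-- B replaces A's per-split branch-chain helper by two incrementally built
-- dynamic-programming tables of (integer, fraction) dot-splits plus one
-- filtered pairing comprehension; objective: alternative (same cost).
-- Strings are handled as their char lists ("+" on str = list append); exact.

-- ===== PORT A =====
-- helper solution_504_3_2 of A, on char lists
def pvAHelp (x : List Char) : List (List Char) :=
  if x.length = 1 then [x]
  else if PySem.List.pyGet? x 0 = some '0' ∧ PySem.List.pyGet? x ((x.length : Int) - 1) = some '0' then []
  else if PySem.List.pyGet? x 0 = some '0' then ['0' :: '.' :: PySem.List.slice x (some 1) none]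
  else if PySem.List.pyGet? x (-1) = some '0' then [x]
  else
    -- cur += x[i]: the loop index is always in range, pyGetD is exact here
    ((PySem.List.pyRange 0 ((x.length : Int) - 1) 1).foldl
      (fun (st : List Char × List (List Char)) i =>
        let cur := st.1 ++ [PySem.List.pyGetD x i ' ']
        let second := PySem.List.slice x (some (i + 1)) none
        (cur, st.2 ++ [cur ++ '.' :: second]))
      ([], [x])).2

def solution_504_3_1 (s : String) : List String :=
  let t := PySem.List.slice s.toList (some 1) (some ((s.toList.length : Int) - 1))
  let n : Int := t.length
  ((PySem.List.pyRange 1 n 1).foldl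
    (fun ans i =>
      let l := PySem.List.slice t none (some i)
      let r := PySem.List.slice t (some i) none
      let lv := pvAHelp l
      let rv := pvAHelp r
      if lv = [] ∧ rv = [] then ans
      else lv.foldl (fun a1 lc =>
             rv.foldl (fun a2 rc => a2 ++ ['(' :: lc ++ ',' :: ' ' :: rc ++ [')']]) a1) ans)
    []).map String.ofList

-- ===== PORT B =====
-- ok(a) of Source B: the number has no leading zero, or is exactly "0"
def pvOk (a : List Char) : Bool := a == ['0'] || PySem.List.pyGet? a 0 != some '0'

-- lsp table of Source B; the sequential table update lsp[i] = f(lsp[i-1]) is ported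
-- as the same recurrence, computed by structural recursion on the index
def pvLsp (t : List Char) : Nat → List (List Char × List Char)
  | 0 => []
  | 1 => []
  | i + 2 =>
      (pvLsp t (i + 1)).map (fun ab => (ab.1, ab.2 ++ [PySem.List.pyGetD t ((i + 1 : Nat) : Int) ' '])) ++
      [(PySem.List.slice t none (some ((i + 1 : Nat) : Int)), [PySem.List.pyGetD t ((i + 1 : Nat) : Int) ' '])]

-- rsp table of Source B; the leftward update rsp[i] = f(rsp[i+1]) is ported as the
-- same recurrence on the index (rsp[i] = [] for i ≥ n - 1, as in Source B)
def pvRsp (t : List Char) (i : Nat) : List (List Char × List Char) :=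
  if i + 2 ≤ t.length then
    ([PySem.List.pyGetD t (i : Int) ' '], PySem.List.slice t (some ((i + 1 : Nat) : Int)) none) ::
      (pvRsp t (i + 1)).map (fun ab => (PySem.List.pyGetD t (i : Int) ' ' :: ab.1, ab.2))
  else []
termination_by t.length - i
decreasing_by omega

-- cands of Source B: the undotted number, then the filtered table entries
def pvCands (x : List Char) (splits : List (List Char × List Char)) : List (List Char) :=
  (if pvOk x then [x] else []) ++
  splits.filterMap (fun ab =>
    if pvOk ab.1 && (PySem.List.pyGet? ab.2 (-1) != some '0')
    then some (ab.1 ++ '.' :: ab.2) else none)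

def solution_504_3_1_alt (s : String) : List String :=
  let t := PySem.List.slice s.toList (some 1) (some ((s.toList.length : Int) - 1))
  ((PySem.List.pyRange 1 (t.length : Int) 1).flatMap (fun i =>
    (pvCands (PySem.List.slice t none (some i)) (pvLsp t i.toNat)).flatMap (fun lc =>
      (pvCands (PySem.List.slice t (some i) none) (pvRsp t i.toNat)).map (fun rc =>
        '(' :: lc ++ ',' :: ' ' :: rc ++ [')'])))).map String.ofList

-- ===== PRECONDITION & SPEC =====
def Spec_solution_504_3_1 (s : String) (out : List String) : Prop := out = solution_504_3_1_alt s
instance (s : String) (out : List String) : Decidable (Spec_solution_504_3_1 s out) := by unfold Spec_solution_504_3_1; infer_instance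

-- ===== CLAIM (what is proved, stated in full; the proofs are below) =====
def Claim_equal_solution_504_3_1 : Prop := ∀ (s : String), Dom_solution_504_3_1 s → Spec_solution_504_3_1 s (solution_504_3_1 s)

-- ===== LEMMAS AND PROOFS =====

-- the split table of a substring x, in closed form: all (x[:j], x[j:]), j ascending
def pvSplitsN (x : List Char) : List (List Char × List Char) :=
  (List.range' 1 (x.length - 1)).map (fun j => (x.take j, x.drop j))

theorem pvHeadTake (l : List Char) (n : Nat) (h : 1 ≤ n) : (l.take n).head? = l.head? := by
  cases l with
  | nil => simp
  | cons a t => cases n with | zero => omega | succ m => simp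

theorem pvLastDrop (l : List Char) (n : Nat) (h : n < l.length) : (l.drop n).getLast? = l.getLast? := by
  rw [List.getLast?_eq_getElem?, List.getLast?_eq_getElem?, List.getElem?_drop]
  congr 1
  simp
  omega

theorem pvTakeSucc (l : List Char) (k : Nat) (h : k < l.length) : l.take (k+1) = l.take k ++ [l[k]] := by
  rw [List.take_add_one]; simp [List.getElem?_eq_getElem h]

theorem pvFilterMapNone {a b : Type} (p : a → Bool) (g : a → b) (l : List a)
    (h : ∀ i ∈ l, ¬ p i = true) : l.filterMap (fun i => if p i then some (g i) else none) = [] := by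
  induction l with
  | nil => rfl
  | cons y ys ih =>
    have := h y (by simp)
    simp only [List.filterMap_cons, if_neg this]
    exact ih (fun i hi => h i (by simp [hi]))

theorem pvFilterMapAll {a b : Type} (p : a → Bool) (g : a → b) (l : List a)
    (h : ∀ i ∈ l, p i = true) : l.filterMap (fun i => if p i then some (g i) else none) = l.map g := by
  induction l with
  | nil => rfl
  | cons y ys ih =>
    have := h y (by simp)
    simp only [List.filterMap_cons, if_pos this, List.map_cons]
    rw [ih (fun i hi => h i (by simp [hi]))]

-- splitting one more character onto the right end of the substring
theorem pvSplitsN_concat (x : List Char) (c : Char) (hx : x ≠ []) :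
    pvSplitsN (x ++ [c]) = (pvSplitsN x).map (fun ab => (ab.1, ab.2 ++ [c])) ++ [(x, [c])] := by
  obtain ⟨m, hm⟩ : ∃ m, x.length = m + 1 :=
    ⟨x.length - 1, by have := List.length_pos_of_ne_nil hx; omega⟩
  simp only [pvSplitsN, List.length_append, List.length_singleton, hm,
    Nat.add_sub_cancel]
  rw [List.range'_concat, List.map_append, List.map_map]
  congr 1
  · apply List.map_congr_left
    intro j hj
    have hj' : 1 ≤ j ∧ j < 1 + m := List.mem_range'_1.mp hj
    simp only [Function.comp]
    rw [List.take_append_of_le_length (by omega),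
        List.drop_append_of_le_length (by omega)]
  · simp only [List.map_cons, List.map_nil]
    rw [List.take_left' (by omega), List.drop_left' (by omega)]

-- splitting one more character onto the left end of the substring
theorem pvSplitsN_cons (c : Char) (y : List Char) (hy : y ≠ []) :
    pvSplitsN (c :: y) = ([c], y) :: (pvSplitsN y).map (fun ab => (c :: ab.1, ab.2)) := by
  obtain ⟨m, hm⟩ : ∃ m, y.length = m + 1 :=
    ⟨y.length - 1, by have := List.length_pos_of_ne_nil hy; omega⟩
  simp only [pvSplitsN, List.length_cons, hm, Nat.add_sub_cancel]
  rw [List.range'_succ, List.map_cons, List.map_map]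
  congr 1
  have hsh : List.range' 2 m = (List.range' 1 m).map (fun j => 1 + j) := by
    rw [List.map_add_range']
  rw [hsh, List.map_map]
  apply List.map_congr_left
  intro j _
  simp only [Function.comp]
  have h1j : 1 + j = j + 1 := by omega
  rw [h1j, List.take_succ_cons, List.drop_succ_cons]

-- the left table at index i is the split table of the prefix t[:i]
theorem pvLsp_eq (t : List Char) (i : Nat) (hi : i ≤ t.length) :
    pvLsp t i = pvSplitsN (t.take i) := by
  induction i with
  | zero => simp [pvLsp, pvSplitsN]
  | succ m ih =>
    match m, ih with
    | 0, _ => simp [pvLsp, pvSplitsN]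
    | k + 1, ih =>
      have hk2 : k + 2 ≤ t.length := hi
      have hget : PySem.List.pyGetD t ((k + 1 : Nat) : Int) ' ' = t[k + 1]'(by omega) := by
        rw [PySem.List.pyGetD_natCast]
        exact List.getD_eq_getElem t ' ' (by omega)
      have hslice : PySem.List.slice t none (some ((k + 1 : Nat) : Int)) = t.take (k + 1) := by
        rw [PySem.List.slice_to_natCast]
      have hne : t.take (k + 1) ≠ [] := by
        have hlen : (t.take (k + 1)).length = k + 1 := by
          rw [List.length_take]; omega
        intro hcon
        rw [hcon] at hlen
        simp at hlen
      have hx : t.take (k + 1 + 1) = t.take (k + 1) ++ [t[k + 1]'(by omega)] :=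
        pvTakeSucc t (k + 1) (by omega)
      show (pvLsp t (k + 1)).map _ ++ _ = _
      rw [ih (by omega), hget, hslice, hx, pvSplitsN_concat _ _ hne]

-- the right table at index i is the split table of the suffix t[i:]
theorem pvRsp_eq (t : List Char) (i : Nat) : pvRsp t i = pvSplitsN (t.drop i) := by
  by_cases h : i + 2 ≤ t.length
  · have hlt : i < t.length := by omega
    rw [pvRsp, if_pos h, pvRsp_eq t (i + 1)]
    have hget : PySem.List.pyGetD t (i : Int) ' ' = t[i] := by
      rw [PySem.List.pyGetD_natCast]
      exact List.getD_eq_getElem t ' ' hlt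
    have hslice : PySem.List.slice t (some ((i + 1 : Nat) : Int)) none = t.drop (i + 1) := by
      rw [PySem.List.slice_from_natCast]
    have hy : t.drop i = t[i] :: t.drop (i + 1) := List.drop_eq_getElem_cons hlt
    have hne : t.drop (i + 1) ≠ [] := by
      have hlen : (t.drop (i + 1)).length = t.length - (i + 1) := List.length_drop
      intro hcon
      rw [hcon] at hlen
      simp at hlen
      omega
    rw [hget, hslice, hy, pvSplitsN_cons _ _ hne]
  · rw [pvRsp, if_neg h]
    have hz : t.length - i - 1 = 0 := by omega
    simp [pvSplitsN, hz]
termination_by t.length - i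
decreasing_by omega

-- A's inner loop builds exactly the dotted splits, left to right
theorem pvALoop (x : List Char) (m k : Nat) (L : List (List Char))
    (hm : x.length - 1 - k = m) (hk : k + 1 ≤ x.length) :
    ((PySem.List.pyRange (k : Int) ((x.length : Int) - 1) 1).foldl
      (fun (st : List Char × List (List Char)) i =>
        let cur := st.1 ++ [PySem.List.pyGetD x i ' ']
        let second := PySem.List.slice x (some (i + 1)) none
        (cur, st.2 ++ [cur ++ '.' :: second]))
      (x.take k, L)).2
    = L ++ (PySem.List.pyRange ((k : Int) + 1) (x.length : Int) 1).map
        (fun i => PySem.List.slice x none (some i) ++ '.' :: PySem.List.slice x (some i) none) := by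
  induction m generalizing k L with
  | zero =>
    have hk1 : k = x.length - 1 := by omega
    rw [PySem.List.pyRange_one_eq_nil (by omega : ((x.length : Int) - 1) ≤ (k : Int)),
        PySem.List.pyRange_one_eq_nil (by omega : ((x.length : Int)) ≤ (k : Int) + 1)]
    simp
  | succ m ih =>
    have hklt : (k : Int) < (x.length : Int) - 1 := by omega
    rw [PySem.List.pyRange_one_cons hklt]
    simp only [List.foldl_cons]
    have hgd : PySem.List.pyGetD x (k : Int) ' ' = x[k]'(by omega) := by
      rw [PySem.List.pyGetD_natCast]
      exact List.getD_eq_getElem x ' ' (by omega)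
    have hsl : PySem.List.slice x (some ((k : Int) + 1)) none = x.drop (k + 1) := by
      have : (k : Int) + 1 = ((k + 1 : Nat) : Int) := by push_cast; ring
      rw [this, PySem.List.slice_from_natCast]
    have hcur : x.take k ++ [PySem.List.pyGetD x (k : Int) ' '] = x.take (k + 1) := by
      rw [hgd, pvTakeSucc x k (by omega)]
    simp only [hcur, hsl]
    have hcast : (k : Int) + 1 = ((k + 1 : Nat) : Int) := by push_cast; ring
    rw [hcast, ih (k + 1) (L ++ [x.take (k + 1) ++ '.' :: x.drop (k + 1)]) (by omega) (by omega)]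
    rw [PySem.List.pyRange_one_cons (by omega : ((k + 1 : Nat) : Int) < (x.length : Int))]
    simp only [List.map_cons, List.append_assoc, List.singleton_append]
    congr 2
    rw [PySem.List.slice_to_natCast, PySem.List.slice_from_natCast]

-- the slice form of the dotted splits equals the take/drop form
theorem pvSliceMap (x : List Char) :
    (PySem.List.pyRange 1 (x.length : Int) 1).map
      (fun i => PySem.List.slice x none (some i) ++ '.' :: PySem.List.slice x (some i) none)
    = (List.range' 1 (x.length - 1)).map (fun j => x.take j ++ '.' :: x.drop j) := by
  rw [PySem.List.pyRange_one, List.range'_eq_map_range, List.map_map, List.map_map]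
  have hnat : ((x.length : Int) - 1).toNat = x.length - 1 := by omega
  rw [hnat]
  apply List.map_congr_left
  intro k _
  simp only [Function.comp]
  have hc1 : (1 : Int) + (k : Nat) = ((1 + k : Nat) : Int) := by push_cast; ring
  rw [hc1, PySem.List.slice_to_natCast, PySem.List.slice_from_natCast]

-- A's helper equals B's filtered table candidates, for every nonempty substring
theorem pvHelp_eq (x : List Char) (hx : x ≠ []) : pvAHelp x = pvCands x (pvSplitsN x) := by
  by_cases h1 : x.length = 1
  · obtain ⟨c, rfl⟩ := List.length_eq_one_iff.mp h1
    by_cases hc : c = '0' <;>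
      simp [pvAHelp, pvCands, pvSplitsN, pvOk, hc]
  · have hlen : 2 ≤ x.length := by
      have := List.length_pos_of_ne_nil hx
      omega
    have hget0 : PySem.List.pyGet? x 0 = x.head? := by
      rw [PySem.List.pyGet?_zero, ← List.head?_eq_getElem?]
    have hgetL : PySem.List.pyGet? x ((x.length : Int) - 1) = x.getLast? := by
      have hc : ((x.length : Int) - 1) = ((x.length - 1 : Nat) : Int) := by omega
      rw [hc, PySem.List.pyGet?_natCast, ← List.getLast?_eq_getElem?]
    have hgetm1 : PySem.List.pyGet? x (-1) = x.getLast? := PySem.List.pyGet?_neg_one x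
    have hh : x.head? = some (x.head hx) := List.head?_eq_some_head hx
    have hl : x.getLast? = some (x.getLast hx) := List.getLast?_eq_some_getLast hx
    have hne : x ≠ ['0'] := by
      intro h; rw [h] at hlen; simp at hlen
    have hmem : ∀ j ∈ List.range' 1 (x.length - 1), 1 ≤ j ∧ j < x.length := by
      intro j hj
      have := List.mem_range'_1.mp hj
      omega
    have htake0 : ∀ j : Nat, 1 ≤ j → PySem.List.pyGet? (x.take j) 0 = x.head? := by
      intro j hj
      rw [PySem.List.pyGet?_zero, ← List.head?_eq_getElem?, pvHeadTake x j hj]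
    have hdropL : ∀ j : Nat, j < x.length → PySem.List.pyGet? (x.drop j) (-1) = x.getLast? := by
      intro j hj
      rw [PySem.List.pyGet?_neg_one, pvLastDrop x j hj]
    have htklen : ∀ j : Nat, j < x.length → (x.take j).length = j := by
      intro j hj
      rw [List.length_take]; omega
    -- B's candidate list in filterMap form
    have hBform : pvCands x (pvSplitsN x) =
        (if pvOk x then [x] else []) ++
        (List.range' 1 (x.length - 1)).filterMap (fun j =>
          if pvOk (x.take j) && (PySem.List.pyGet? (x.drop j) (-1) != some '0')
          then some (x.take j ++ '.' :: x.drop j) else none) := by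
      simp only [pvCands, pvSplitsN, List.filterMap_map, Function.comp]
    rw [hBform]
    by_cases h0 : x.head hx = '0' <;> by_cases l0 : x.getLast hx = '0'
    · -- leading and trailing zero: both sides empty
      rw [if_neg (by
            simp only [pvOk, Bool.or_eq_true, beq_iff_eq, bne_iff_ne]
            push Not
            exact ⟨hne, by rw [hget0, hh, h0]⟩),
          pvFilterMapNone _ _ _ (by
            intro j hj
            obtain ⟨hj1, hj2⟩ := hmem j hj
            simp only [Bool.and_eq_true, bne_iff_ne]
            intro hcon
            exact hcon.2 (by rw [hdropL j hj2, hl, l0]))]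
      simp only [pvAHelp]
      rw [if_neg (by omega), if_pos ⟨by rw [hget0, hh, h0], by rw [hgetL, hl, l0]⟩]
      simp
    · -- leading zero only: exactly "0." ++ rest
      have htake1 : x.take 1 = ['0'] := by
        cases x with
        | nil => exact absurd rfl hx
        | cons a t => simp at h0 ⊢; exact h0
      rw [if_neg (by
            simp only [pvOk, Bool.or_eq_true, beq_iff_eq, bne_iff_ne]
            push Not
            exact ⟨hne, by rw [hget0, hh, h0]⟩)]
      have hsp : x.length - 1 = (x.length - 2) + 1 := by omega
      rw [hsp, List.range'_succ, List.filterMap_cons]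
      rw [if_pos (by
            simp only [pvOk, Bool.and_eq_true, Bool.or_eq_true, beq_iff_eq, bne_iff_ne]
            refine ⟨Or.inl htake1, ?_⟩
            rw [hdropL 1 (by omega), hl]
            simp [l0]),
          pvFilterMapNone _ _ _ (by
            intro j hj
            have hj' : 2 ≤ j ∧ j < x.length := by
              have := List.mem_range'_1.mp hj
              omega
            simp only [pvOk, Bool.and_eq_true, Bool.or_eq_true, beq_iff_eq, bne_iff_ne]
            intro hcon
            rcases hcon.1 with hc | hc
            · have := htklen j (by omega)
              rw [hc] at this
              simp at this
              omega
            · exact hc (by rw [htake0 j (by omega), hh, h0]))]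
      simp only [pvAHelp]
      rw [if_neg (by omega),
          if_neg (by intro hcon; rw [hgetL, hl] at hcon; simp [l0] at hcon),
          if_pos (by rw [hget0, hh, h0]),
          PySem.List.slice_from_one]
      rw [htake1, List.drop_one]
      simp
    · -- trailing zero only: just x itself
      rw [if_pos (by
            simp only [pvOk, Bool.or_eq_true, beq_iff_eq, bne_iff_ne]
            right
            rw [hget0, hh]
            simp [h0]),
          pvFilterMapNone _ _ _ (by
            intro j hj
            obtain ⟨hj1, hj2⟩ := hmem j hj
            simp only [Bool.and_eq_true, bne_iff_ne]
            intro hcon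
            exact hcon.2 (by rw [hdropL j hj2, hl, l0]))]
      simp only [pvAHelp]
      rw [if_neg (by omega),
          if_neg (by intro hcon; rw [hget0, hh] at hcon; exact h0 (Option.some.inj hcon.1)),
          if_neg (by intro hcon; rw [hget0, hh] at hcon; exact h0 (Option.some.inj hcon)),
          if_pos (by rw [hgetm1, hl, l0])]
      simp
    · -- no leading or trailing zero: every dotted split is kept
      rw [if_pos (by
            simp only [pvOk, Bool.or_eq_true, beq_iff_eq, bne_iff_ne]
            right
            rw [hget0, hh]
            simp [h0]),
          pvFilterMapAll _ _ _ (by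
            intro j hj
            obtain ⟨hj1, hj2⟩ := hmem j hj
            simp only [pvOk, Bool.and_eq_true, Bool.or_eq_true, beq_iff_eq, bne_iff_ne]
            refine ⟨Or.inr ?_, ?_⟩
            · rw [htake0 j hj1, hh]
              simp [h0]
            · rw [hdropL j hj2, hl]
              simp [l0])]
      simp only [pvAHelp]
      rw [if_neg (by omega),
          if_neg (by intro hcon; rw [hget0, hh] at hcon; exact h0 (Option.some.inj hcon.1)),
          if_neg (by intro hcon; rw [hget0, hh] at hcon; exact h0 (Option.some.inj hcon)),
          if_neg (by intro hcon; rw [hgetm1, hl] at hcon; exact l0 (Option.some.inj hcon))]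
      have := pvALoop x (x.length - 1) 0 [x] (by omega) (by omega)
      simp only [Nat.cast_zero, List.take_zero, zero_add] at this
      rw [this, pvSliceMap]

-- the outer accumulation loop of A is the comprehension of B
theorem pvTop (t : List Char) :
    ((PySem.List.pyRange 1 (t.length : Int) 1).foldl
      (fun ans i =>
        let l := PySem.List.slice t none (some i)
        let r := PySem.List.slice t (some i) none
        let lv := pvAHelp l
        let rv := pvAHelp r
        if lv = [] ∧ rv = [] then ans
        else lv.foldl (fun a1 lc =>
               rv.foldl (fun a2 rc => a2 ++ ['(' :: lc ++ ',' :: ' ' :: rc ++ [')']]) a1) ans)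
      ([] : List (List Char)))
    = (PySem.List.pyRange 1 (t.length : Int) 1).flatMap (fun i =>
        (pvCands (PySem.List.slice t none (some i)) (pvLsp t i.toNat)).flatMap (fun lc =>
          (pvCands (PySem.List.slice t (some i) none) (pvRsp t i.toNat)).map (fun rc =>
            '(' :: lc ++ ',' :: ' ' :: rc ++ [')']))) := by
  have hbody : ∀ (acc : List (List Char)) (i : Int), i ∈ PySem.List.pyRange 1 (t.length : Int) 1 →
      (if pvAHelp (PySem.List.slice t none (some i)) = [] ∧ pvAHelp (PySem.List.slice t (some i) none) = [] then acc
       else (pvAHelp (PySem.List.slice t none (some i))).foldl (fun a1 lc =>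
         (pvAHelp (PySem.List.slice t (some i) none)).foldl
           (fun a2 rc => a2 ++ ['(' :: lc ++ ',' :: ' ' :: rc ++ [')']]) a1) acc)
      = acc ++ (pvCands (PySem.List.slice t none (some i)) (pvLsp t i.toNat)).flatMap (fun lc =>
          (pvCands (PySem.List.slice t (some i) none) (pvRsp t i.toNat)).map (fun rc =>
            '(' :: lc ++ ',' :: ' ' :: rc ++ [')'])) := by
    intro acc i hi
    obtain ⟨hi1, hi2⟩ := PySem.List.mem_pyRange_one.mp hi
    have htne : t ≠ [] := by
      intro h
      rw [h] at hi2
      simp at hi2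
      omega
    have hsliceL : PySem.List.slice t none (some i) = t.take i.toNat :=
      PySem.List.slice_to t (by omega)
    have hsliceR : PySem.List.slice t (some i) none = t.drop i.toNat :=
      PySem.List.slice_from t (by omega)
    have hlne : t.take i.toNat ≠ [] := by
      intro h
      rcases List.take_eq_nil_iff.mp h with h' | h'
      · omega
      · exact htne h'
    have hrne : t.drop i.toNat ≠ [] := by
      intro h
      have := List.drop_eq_nil_iff.mp h
      omega
    rw [hsliceL, hsliceR, pvLsp_eq t i.toNat (by omega), pvRsp_eq t i.toNat,
        pvHelp_eq _ hlne, pvHelp_eq _ hrne]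
    split_ifs with hemp
    · rw [hemp.1]
      simp
    · simp only [PySem.List.foldl_append_singleton_eq_map]
      rw [PySem.List.foldl_append_eq_flatMap]
  calc ((PySem.List.pyRange 1 (t.length : Int) 1).foldl
        (fun ans i =>
          let l := PySem.List.slice t none (some i)
          let r := PySem.List.slice t (some i) none
          let lv := pvAHelp l
          let rv := pvAHelp r
          if lv = [] ∧ rv = [] then ans
          else lv.foldl (fun a1 lc =>
                 rv.foldl (fun a2 rc => a2 ++ ['(' :: lc ++ ',' :: ' ' :: rc ++ [')']]) a1) ans)
        ([] : List (List Char)))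
      = ((PySem.List.pyRange 1 (t.length : Int) 1).foldl
        (fun ans i => ans ++ (pvCands (PySem.List.slice t none (some i)) (pvLsp t i.toNat)).flatMap (fun lc =>
          (pvCands (PySem.List.slice t (some i) none) (pvRsp t i.toNat)).map (fun rc =>
            '(' :: lc ++ ',' :: ' ' :: rc ++ [')'])))
        ([] : List (List Char))) := PySem.List.foldl_congr_mem _ _ _ _ hbody
    _ = _ := by
        rw [PySem.List.foldl_append_eq_flatMap]
        simp

-- ===== VERDICT (by name: the statement is the Claim_ definition above) =====
theorem solution_504_3_1_spec : Claim_equal_solution_504_3_1 := by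
  intro s _
  simp only [Spec_solution_504_3_1, solution_504_3_1, solution_504_3_1_alt]
  rw [pvTop]
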